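-- pv_equiv track=rewrite | github.com/Chemokoren/Algorithms-1 | GFG/Arrays/Sorting/two_elements_whose_sum_is_closest_to_zero.py | my_tests
-- ===== SOURCE A (Python) =====
-- def my_tests(arr):
--     arr.sort()
--     smallest =float('inf')
--
--     start =0
--     end =len(arr)-1
--     i =0
--     j= 0
--
--     if len(arr) < 2:
--         return "Invalid Input"
--
--     while start <= end:
--
--         sum_val =arr[end]+arr[start]
--         if abs(sum_val) < smallest:
--             smallest = abs(sum_val)
--             i =start
--             j =end
--
--         if(sum_val < 0):
--             start +=1
--         else:
--             end -=1
--
--     return smallest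
-- ===== SOURCE B (Python) =====
-- def my_tests(arr):
--     arr.sort()
--     if len(arr) < 2:
--         return "Invalid Input"
--     n = len(arr)
--     return min(abs(arr[i] + arr[j]) for i in range(n) for j in range(i, n))
-- ===== Notes on version B (the rewrite author's own statement) =====
-- stated objective: simpler
-- what changed: A's sorted two-pointer scan with an inf sentinel and tracked indices is replaced by a direct minimum of abs(arr[i]+arr[j]) over all index pairs i <= j.
-- outside the precondition, e.g. on my_tests([5]): A returns 'Invalid Input', B returns 'Invalid Input'; on my_tests([]): A returns 'Invalid Input', B returns 'Invalid Input'
import Mathlib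
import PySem

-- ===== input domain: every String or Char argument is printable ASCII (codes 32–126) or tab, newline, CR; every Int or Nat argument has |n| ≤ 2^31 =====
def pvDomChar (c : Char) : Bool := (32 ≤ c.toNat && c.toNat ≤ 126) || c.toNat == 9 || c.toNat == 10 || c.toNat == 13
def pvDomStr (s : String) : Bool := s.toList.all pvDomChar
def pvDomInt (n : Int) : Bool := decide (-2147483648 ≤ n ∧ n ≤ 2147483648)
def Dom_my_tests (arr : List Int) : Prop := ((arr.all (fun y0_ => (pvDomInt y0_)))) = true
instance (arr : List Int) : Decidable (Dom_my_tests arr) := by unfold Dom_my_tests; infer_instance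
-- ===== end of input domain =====

-- B replaces A's two-pointer scan with a direct minimum over all index pairs i ≤ j (simpler; not faster).
-- Both A and B sort arr in place (same side effect); the equivalence proved is about the return value.

-- ===== PORT A =====
-- while start <= end: … ; 'smallest' starts as float('inf'), modelled as Option Int with none = inf
-- (the loop always runs at least once when len(arr) ≥ 2, so the returned value is an Int).
-- Indices are nonnegative and in range at every access, so pyGetD is exact.
def aLoopA (l : List Int) (s e : Int) (best : Option Int) : Option Int :=
  if h : s ≤ e then
    let sum := PySem.List.pyGetD l e 0 + PySem.List.pyGetD l s 0
    let best' := match best with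
      | none => some |sum|
      | some b => if |sum| < b then some |sum| else some b
    if sum < 0 then aLoopA l (s + 1) e best' else aLoopA l s (e - 1) best'
  else best
termination_by (e + 1 - s).toNat
decreasing_by all_goals omega

def my_tests (arr : List Int) : Int :=
  let l := PySem.List.sorted arr (fun x => x) false
  if l.length < 2 then 0  -- Python returns the string "Invalid Input" here; excluded by Pre_my_tests
  else (aLoopA l 0 ((l.length : Int) - 1) none).getD 0

-- ===== PORT B =====
-- min(abs(arr[i] + arr[j]) for i in range(n) for j in range(i, n)); range(i, n) is List.range' i (n - i)
def my_tests_alt (arr : List Int) : Int :=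
  let l := PySem.List.sorted arr (fun x => x) false
  if l.length < 2 then 0  -- Python returns the string "Invalid Input" here; excluded by Pre_my_tests
  else
    let cands := (List.range l.length).flatMap (fun i =>
      (List.range' i (l.length - i)).map (fun j => |l.getD i 0 + l.getD j 0|))
    match cands with
    | [] => 0  -- unreachable: cands is nonempty when l ≠ []
    | c :: cs => cs.foldl min c

-- ===== PRECONDITION & SPEC =====
-- Pre_ excludes lists of length < 2, on which A returns the string "Invalid Input" instead of an integer.
def Pre_my_tests (arr : List Int) : Prop := 2 ≤ arr.length
instance (arr : List Int) : Decidable (Pre_my_tests arr) := by unfold Pre_my_tests; infer_instance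
def pvWitness_my_tests : List Int := [1, -2]

def Spec_my_tests (arr : List Int) (out : Int) : Prop := out = my_tests_alt arr
instance (arr : List Int) (out : Int) : Decidable (Spec_my_tests arr out) := by unfold Spec_my_tests; infer_instance

-- ===== CLAIM (what is proved, stated in full; the proofs are below) =====
def Claim_equal_my_tests : Prop := ∀ (arr : List Int), Dom_my_tests arr → Pre_my_tests arr → Spec_my_tests arr (my_tests arr)

-- ===== LEMMAS AND PROOFS =====

-- "r is the minimum of |l[i]+l[j]| over s ≤ i ≤ j ≤ e"
def IsM (l : List Int) (s e : Nat) (r : Int) : Prop :=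
  (∃ i j, s ≤ i ∧ i ≤ j ∧ j ≤ e ∧ r = |l.getD i 0 + l.getD j 0|) ∧
  (∀ i j, s ≤ i → i ≤ j → j ≤ e → r ≤ |l.getD i 0 + l.getD j 0|)

theorem IsM_unique {l : List Int} {s e : Nat} {r r' : Int}
    (h : IsM l s e r) (h' : IsM l s e r') : r = r' := by
  obtain ⟨⟨i, j, h1, h2, h3, h4⟩, hmin⟩ := h
  obtain ⟨⟨i', j', g1, g2, g3, g4⟩, gmin⟩ := h'
  have hle : r ≤ r' := by rw [g4]; exact hmin i' j' g1 g2 g3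
  have hge : r' ≤ r := by rw [h4]; exact gmin i j h1 h2 h3
  omega

def mOpt (o : Option Int) (v : Int) : Int := match o with | none => v | some b => min b v

theorem best'_eq (best : Option Int) (v : Int) :
    (match best with
      | none => some |v|
      | some b => if |v| < b then some |v| else some b) = some (mOpt best |v|) := by
  cases best with
  | none => rfl
  | some b => simp only [mOpt, min_def]; split_ifs <;> simp_all <;> omega

theorem aLoopA_stop (l : List Int) (s e : Int) (best : Option Int) (h : e < s) :
    aLoopA l s e best = best := by
  rw [aLoopA, dif_neg (by omega)]

theorem aLoopA_eq (l : List Int)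
    (hs : ∀ i j : Nat, i ≤ j → j < l.length → l.getD i 0 ≤ l.getD j 0) :
    ∀ (d s e : Nat) (best : Option Int), e - s = d → s ≤ e → e < l.length →
      ∃ r, IsM l s e r ∧ aLoopA l (s : Int) (e : Int) best = some (mOpt best r) := by
  intro d
  induction d with
  | zero =>
    intro s e best hd hse hlen
    have hse' : s = e := by omega
    subst hse'
    rw [aLoopA, dif_pos (by omega)]
    simp only [PySem.List.pyGetD_natCast]
    refine ⟨|l.getD s 0 + l.getD s 0|, ⟨⟨s, s, le_refl _, le_refl _, le_refl _, rfl⟩, ?_⟩, ?_⟩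
    · intro i j h1 h2 h3
      have : i = s := by omega
      have : j = s := by omega
      subst_vars; exact le_refl _
    · rw [best'_eq]
      split_ifs with hneg
      · rw [aLoopA_stop _ _ _ _ (by omega)]
      · rw [aLoopA_stop _ _ _ _ (by omega)]
  | succ d ih =>
    intro s e best hd hse hlen
    have hlt : s < e := by omega
    rw [aLoopA, dif_pos (by exact_mod_cast Int.ofNat_le.mpr hse)]
    simp only [PySem.List.pyGetD_natCast]
    set v := l.getD e 0 + l.getD s 0 with hv
    rw [best'_eq]
    split_ifs with hneg
    · -- sum < 0: advance start
      have hcast : (s : Int) + 1 = ((s + 1 : Nat) : Int) := by push_cast; ring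
      rw [hcast]
      obtain ⟨r', ⟨⟨i, j, p1, p2, p3, p4⟩, hlb⟩, hrec⟩ :=
        ih (s + 1) e (some (mOpt best |v|)) (by omega) (by omega) hlen
      refine ⟨min |v| r', ⟨?_, ?_⟩, ?_⟩
      · rcases le_total |v| r' with h | h
        · exact ⟨s, e, le_refl _, by omega, le_refl _, by rw [min_eq_left h, hv, add_comm]⟩
        · exact ⟨i, j, by omega, p2, p3, by rw [min_eq_right h]; exact p4⟩
      · intro i' j' q1 q2 q3
        by_cases hi : s + 1 ≤ i'
        · calc min |v| r' ≤ r' := min_le_right _ _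
            _ ≤ _ := hlb i' j' hi q2 q3
        · have hi' : i' = s := by omega
          have hj : l.getD j' 0 ≤ l.getD e 0 := hs j' e q3 hlen
          have h1 : l.getD i' 0 + l.getD j' 0 ≤ v := by rw [hi', hv]; omega
          have h2 : |v| ≤ |l.getD i' 0 + l.getD j' 0| := by
            rw [abs_of_neg hneg]
            calc -v ≤ -(l.getD i' 0 + l.getD j' 0) := by omega
              _ ≤ |l.getD i' 0 + l.getD j' 0| := neg_le_abs _
          calc min |v| r' ≤ |v| := min_le_left _ _
            _ ≤ _ := h2
      · rw [hrec]
        congr 1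
        cases best with
        | none => simp [mOpt]
        | some b => simp [mOpt, min_assoc]
    · -- sum ≥ 0: retreat end
      have hcast : (e : Int) - 1 = ((e - 1 : Nat) : Int) := by omega
      rw [hcast]
      obtain ⟨r', ⟨⟨i, j, p1, p2, p3, p4⟩, hlb⟩, hrec⟩ :=
        ih s (e - 1) (some (mOpt best |v|)) (by omega) (by omega) (by omega)
      refine ⟨min |v| r', ⟨?_, ?_⟩, ?_⟩
      · rcases le_total |v| r' with h | h
        · exact ⟨s, e, le_refl _, by omega, le_refl _, by rw [min_eq_left h, hv, add_comm]⟩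
        · exact ⟨i, j, p1, p2, by omega, by rw [min_eq_right h]; exact p4⟩
      · intro i' j' q1 q2 q3
        by_cases hj : j' ≤ e - 1
        · calc min |v| r' ≤ r' := min_le_right _ _
            _ ≤ _ := hlb i' j' q1 q2 hj
        · have hj' : j' = e := by omega
          have hi : l.getD s 0 ≤ l.getD i' 0 := hs s i' q1 (by omega)
          have h1 : v ≤ l.getD i' 0 + l.getD j' 0 := by rw [hj', hv]; omega
          have h2 : |v| ≤ |l.getD i' 0 + l.getD j' 0| := by
            rw [abs_of_nonneg (by omega)]
            calc v ≤ l.getD i' 0 + l.getD j' 0 := h1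
              _ ≤ |l.getD i' 0 + l.getD j' 0| := le_abs_self _
          calc min |v| r' ≤ |v| := min_le_left _ _
            _ ≤ _ := h2
      · rw [hrec]
        congr 1
        cases best with
        | none => simp [mOpt]
        | some b => simp [mOpt, min_assoc]

theorem foldl_min_mem (cs : List Int) (c : Int) : cs.foldl min c ∈ c :: cs := by
  induction cs generalizing c with
  | nil => simp
  | cons a t ih =>
    show t.foldl min (min c a) ∈ c :: a :: t
    rcases List.mem_cons.mp (ih (min c a)) with h | h
    · rw [h]; rcases min_cases c a with ⟨he, _⟩ | ⟨he, _⟩ <;> rw [he] <;> simp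
    · exact List.mem_cons_of_mem _ (List.mem_cons_of_mem _ h)

theorem foldl_min_le (cs : List Int) (c : Int) : ∀ x ∈ c :: cs, cs.foldl min c ≤ x := by
  induction cs generalizing c with
  | nil => intro x hx; simp only [List.foldl_nil]; simp at hx; omega
  | cons a t ih =>
    intro x hx
    show t.foldl min (min c a) ≤ x
    have hmc : t.foldl min (min c a) ≤ min c a := ih (min c a) _ (by simp)
    rcases List.mem_cons.mp hx with h | h
    · calc t.foldl min (min c a) ≤ min c a := hmc
        _ ≤ c := min_le_left _ _
        _ = x := h.symm
    · rcases List.mem_cons.mp h with h' | h'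
      · calc t.foldl min (min c a) ≤ min c a := hmc
          _ ≤ a := min_le_right _ _
          _ = x := h'.symm
      · exact ih (min c a) x (List.mem_cons_of_mem _ h')

theorem mem_cands_iff (l : List Int) (v : Int) :
    v ∈ (List.range l.length).flatMap (fun i =>
        (List.range' i (l.length - i)).map (fun j => |l.getD i 0 + l.getD j 0|)) ↔
      ∃ i j : Nat, i ≤ j ∧ j < l.length ∧ v = |l.getD i 0 + l.getD j 0| := by
  simp only [List.mem_flatMap, List.mem_range, List.mem_map, List.mem_range'_1]
  constructor
  · rintro ⟨i, hi, j, ⟨hij, hjn⟩, hv⟩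
    exact ⟨i, j, hij, by omega, hv.symm⟩
  · rintro ⟨i, j, hij, hjn, hv⟩
    exact ⟨i, by omega, j, ⟨hij, by omega⟩, hv.symm⟩

theorem sorted_getD_mono (l : List Int)
    (hp : l.Pairwise (fun a b => a ≤ b)) :
    ∀ i j : Nat, i ≤ j → j < l.length → l.getD i 0 ≤ l.getD j 0 := by
  intro i j hij hj
  rcases Nat.eq_or_lt_of_le hij with h | h
  · subst h; exact le_refl _
  · rw [List.getD_eq_getElem l 0 (by omega), List.getD_eq_getElem l 0 hj]
    exact List.pairwise_iff_getElem.mp hp i j (by omega) hj h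

-- ===== VERDICT (by name: the statement is the Claim_ definition above) =====
theorem my_tests_spec : Claim_equal_my_tests := by
  intro arr _ hpre
  unfold Spec_my_tests my_tests my_tests_alt
  set l := PySem.List.sorted arr (fun x => x) false with hl
  have hlen : l.length = arr.length := PySem.List.length_sorted arr _ _
  have hn : 2 ≤ l.length := by rw [hlen]; exact hpre
  have hs : ∀ i j : Nat, i ≤ j → j < l.length → l.getD i 0 ≤ l.getD j 0 :=
    sorted_getD_mono l (by simpa using PySem.List.sorted_pairwise arr (fun x => x))
  rw [if_neg (by omega), if_neg (by omega)]
  -- A side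
  have hcast : (l.length : Int) - 1 = ((l.length - 1 : Nat) : Int) := by omega
  obtain ⟨r, hIsM, hA⟩ := aLoopA_eq l hs (l.length - 1) 0 (l.length - 1) none rfl (by omega) (by omega)
  rw [hcast]
  have hA' : (aLoopA l 0 ((l.length - 1 : Nat) : Int) none).getD 0 = r := by
    have : ((0 : Nat) : Int) = (0 : Int) := rfl
    rw [← this, hA]; rfl
  rw [hA']
  -- B side
  set cands := (List.range l.length).flatMap (fun i =>
      (List.range' i (l.length - i)).map (fun j => |l.getD i 0 + l.getD j 0|)) with hc
  have hmem0 : |l.getD 0 0 + l.getD 0 0| ∈ cands := by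
    rw [hc, mem_cands_iff]; exact ⟨0, 0, le_refl _, by omega, rfl⟩
  have hne : cands ≠ [] := by intro h; rw [h] at hmem0; exact List.not_mem_nil hmem0
  obtain ⟨c, cs, hcc⟩ := List.exists_cons_of_ne_nil hne
  rw [hcc]
  have hIsM' : IsM l 0 (l.length - 1) (cs.foldl min c) := by
    constructor
    · have := foldl_min_mem cs c
      rw [← hcc, hc, mem_cands_iff] at this
      obtain ⟨i, j, hij, hjn, hv⟩ := this
      exact ⟨i, j, Nat.zero_le _, hij, by omega, hv⟩
    · intro i j h1 h2 h3
      apply foldl_min_le cs c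
      rw [← hcc, hc, mem_cands_iff]
      exact ⟨i, j, h2, by omega, rfl⟩
  exact IsM_unique hIsM hIsM'
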